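-- pv_equiv track=rewrite | github.com/gimewn/Problem-Solving | 프로그래머스/unrated/159994. 카드 뭉치/카드 뭉치.py | solution
-- ===== SOURCE A (Python) =====
-- def solution(cards1, cards2, goal):
--     answer = 0
--     index01, index02 = 0, 0
--     for word in goal:
--         if index01 < len(cards1) and word == cards1[index01]:
--             index01 += 1
--             answer += 1
--         elif index02 < len(cards2) and word == cards2[index02]:
--             index02 += 1
--             answer += 1
--
--     if answer == len(goal):
--         return "Yes"
--     else:
--         return "No"
-- ===== SOURCE B (Python) =====
-- def solution(cards1, cards2, goal):
--     def strip(g, d):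
--         # drop the maximal common prefix of g and d
--         k = 0
--         while k < len(g) and k < len(d) and g[k] == d[k]:
--             k += 1
--         return g[k:], d[k:]
--
--     g, c1, c2 = goal, cards1, cards2
--     while True:
--         g, c1 = strip(g, c1)
--         if not g:
--             return "Yes"
--         if c2 and c2[0] == g[0]:
--             g, c2 = g[1:], c2[1:]
--         else:
--             return "No"
-- ===== Notes on version B (the rewrite author's own statement) =====
-- stated objective: alternative
-- what changed: Replaces A's flat per-word loop with index counters and a matched-count-vs-len(goal) comparison by a staged phase algorithm: each outer phase strips the maximal common prefix of the remaining goal and the remaining cards1 by slicing, then draws exactly one card from cards2 or exits with 'No'/'Yes' immediately.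
import Mathlib
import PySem

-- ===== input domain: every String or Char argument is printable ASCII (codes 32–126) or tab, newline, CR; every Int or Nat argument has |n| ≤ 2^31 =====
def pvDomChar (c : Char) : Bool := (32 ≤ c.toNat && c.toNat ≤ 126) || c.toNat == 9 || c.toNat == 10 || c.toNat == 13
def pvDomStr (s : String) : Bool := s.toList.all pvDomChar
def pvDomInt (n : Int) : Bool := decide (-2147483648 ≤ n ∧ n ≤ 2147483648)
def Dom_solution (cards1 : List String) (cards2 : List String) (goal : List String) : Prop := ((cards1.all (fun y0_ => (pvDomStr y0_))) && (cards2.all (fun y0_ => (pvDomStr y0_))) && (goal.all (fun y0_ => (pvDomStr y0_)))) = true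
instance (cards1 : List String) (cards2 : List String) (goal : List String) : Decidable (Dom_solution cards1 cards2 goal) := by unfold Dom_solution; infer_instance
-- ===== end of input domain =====

-- B replaces A's flat per-word loop (index counters + matched-count comparison to len(goal))
-- with a staged phase algorithm: strip the maximal common prefix of the remaining goal and
-- the remaining cards1, then draw one card from cards2 or exit (objective: alternative).

-- ===== PORT A =====
-- A's loop body: state (answer, index01, index02); the guarded cards1[index01] access is
-- exact because the getD is only reached under the index01 < len(cards1) conjunct.
def solutionStep (cards1 : List String) (cards2 : List String) (s : Nat × Nat × Nat) (word : String) : Nat × Nat × Nat :=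
  if s.2.1 < cards1.length ∧ word = cards1.getD s.2.1 "" then (s.1 + 1, s.2.1 + 1, s.2.2)
  else if s.2.2 < cards2.length ∧ word = cards2.getD s.2.2 "" then (s.1 + 1, s.2.1, s.2.2 + 1)
  else s

def solution (cards1 : List String) (cards2 : List String) (goal : List String) : String :=
  let s := goal.foldl (solutionStep cards1 cards2) (0, 0, 0)
  if s.1 = goal.length then "Yes" else "No"

-- ===== PORT B =====
-- Source B's strip helper: drop the maximal common prefix of g and d.
def stripRun : List String → List String → List String × List String
  | w :: gr, x :: dr => if w = x then stripRun gr dr else (w :: gr, x :: dr)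
  | g, d => (g, d)

-- termination fact for the outer while loop: strip never lengthens the goal
lemma stripRun_fst_le : ∀ (g d : List String), (stripRun g d).1.length ≤ g.length := by
  intro g
  induction g with
  | nil => intro d; cases d <;> simp [stripRun]
  | cons w gr ih =>
    intro d
    cases d with
    | nil => simp [stripRun]
    | cons x dr =>
      simp only [stripRun]
      split_ifs
      · exact Nat.le_trans (ih dr) (by simp)
      · simp

-- Source B's outer while loop.
def solutionGoB (g c1 c2 : List String) : String :=
  match h : stripRun g c1 with
  | ([], _) => "Yes"
  | (w :: gr, c1') =>
    match c2 with
    | [] => "No"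
    | y :: c2r => if y = w then solutionGoB gr c1' c2r else "No"
termination_by g.length
decreasing_by
  have hle := stripRun_fst_le g c1
  rw [h] at hle
  simp at hle
  omega

def solution_alt (cards1 : List String) (cards2 : List String) (goal : List String) : String :=
  solutionGoB goal cards1 cards2

-- ===== PRECONDITION & SPEC =====
def Spec_solution (cards1 : List String) (cards2 : List String) (goal : List String) (out : String) : Prop := out = solution_alt cards1 cards2 goal
instance (cards1 : List String) (cards2 : List String) (goal : List String) (out : String) : Decidable (Spec_solution cards1 cards2 goal out) := by unfold Spec_solution; infer_instance

-- ===== CLAIM (what is proved, stated in full; the proofs are below) =====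
def Claim_equal_solution : Prop := ∀ (cards1 : List String) (cards2 : List String) (goal : List String), Dom_solution cards1 cards2 goal → Spec_solution cards1 cards2 goal (solution cards1 cards2 goal)

-- ===== LEMMAS AND PROOFS =====

-- proof-only intermediate: the greedy word-by-word recursion on the remaining decks
def greedyGo : List String → List String → List String → String
  | [], _, _ => "Yes"
  | w :: rest, r1, r2 =>
    if r1.head? = some w then greedyGo rest r1.tail r2
    else if r2.head? = some w then greedyGo rest r1 r2.tail
    else "No"

-- each step of A's loop increments answer by at most one
lemma solution_fold_le (cards1 cards2 : List String) :
    ∀ (goal : List String) (s : Nat × Nat × Nat),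
      (goal.foldl (solutionStep cards1 cards2) s).1 ≤ s.1 + goal.length := by
  intro goal
  induction goal with
  | nil => intro s; simp
  | cons w rest ih =>
    intro s
    simp only [List.foldl_cons, List.length_cons]
    have := ih (solutionStep cards1 cards2 s w)
    unfold solutionStep at this ⊢
    split_ifs at this ⊢ <;> omega

-- A's match condition is "the remaining deck's head is the word"
lemma solution_cond_iff (c : List String) (i : Nat) (w : String) :
    (i < c.length ∧ w = c.getD i "") ↔ (c.drop i).head? = some w := by
  rw [List.head?_drop]
  by_cases h : i < c.length
  · simp [List.getD, h, eq_comm]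
  · have h' : c.length ≤ i := Nat.le_of_not_lt h
    simp [h]

-- main invariant: A's count reaches ans + |goal| exactly when the greedy recursion says "Yes"
lemma solution_main (cards1 cards2 : List String) :
    ∀ (goal : List String) (ans i1 i2 : Nat),
      ((goal.foldl (solutionStep cards1 cards2) (ans, i1, i2)).1 = ans + goal.length ↔
        greedyGo goal (cards1.drop i1) (cards2.drop i2) = "Yes") := by
  intro goal
  induction goal with
  | nil => intro ans i1 i2; simp [greedyGo]
  | cons w rest ih =>
    intro ans i1 i2
    simp only [List.foldl_cons, List.length_cons, greedyGo]
    by_cases h1 : i1 < cards1.length ∧ w = cards1.getD i1 ""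
    · rw [if_pos ((solution_cond_iff cards1 i1 w).mp h1)]
      have hstep : solutionStep cards1 cards2 (ans, i1, i2) w = (ans + 1, i1 + 1, i2) := by
        dsimp only [solutionStep]; rw [if_pos h1]
      rw [hstep, List.tail_drop]
      have := ih (ans + 1) (i1 + 1) i2
      constructor
      · intro h; exact this.mp (by omega)
      · intro h; have := this.mpr h; omega
    · rw [if_neg (fun hc => h1 ((solution_cond_iff cards1 i1 w).mpr hc))]
      by_cases h2 : i2 < cards2.length ∧ w = cards2.getD i2 ""
      · rw [if_pos ((solution_cond_iff cards2 i2 w).mp h2)]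
        have hstep : solutionStep cards1 cards2 (ans, i1, i2) w = (ans + 1, i1, i2 + 1) := by
          dsimp only [solutionStep]; rw [if_neg h1, if_pos h2]
        rw [hstep, List.tail_drop]
        have := ih (ans + 1) i1 (i2 + 1)
        constructor
        · intro h; exact this.mp (by omega)
        · intro h; have := this.mpr h; omega
      · rw [if_neg (fun hc => h2 ((solution_cond_iff cards2 i2 w).mpr hc))]
        have hstep : solutionStep cards1 cards2 (ans, i1, i2) w = (ans, i1, i2) := by
          dsimp only [solutionStep]; rw [if_neg h1, if_neg h2]
        rw [hstep]
        have hle := solution_fold_le cards1 cards2 rest (ans, i1, i2)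
        constructor
        · intro h; omega
        · intro h; exact absurd h (by decide)

lemma greedyGo_yes_or_no : ∀ (goal r1 r2 : List String),
    greedyGo goal r1 r2 = "Yes" ∨ greedyGo goal r1 r2 = "No" := by
  intro goal
  induction goal with
  | nil => intro r1 r2; left; rfl
  | cons w rest ih =>
    intro r1 r2
    simp only [greedyGo]
    split_ifs
    · exact ih _ _
    · exact ih _ _
    · right; rfl

-- B's value depends on (g, c1) only through stripRun g c1
lemma solutionGoB_congr (g c1 g' c1' c2 : List String)
    (h : stripRun g c1 = stripRun g' c1') : solutionGoB g c1 c2 = solutionGoB g' c1' c2 := by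
  rw [solutionGoB.eq_def, solutionGoB.eq_def, h]

-- the greedy recursion equals B's staged recursion
lemma greedy_eq_goB : ∀ (n : Nat) (g c1 c2 : List String), g.length ≤ n →
    greedyGo g c1 c2 = solutionGoB g c1 c2 := by
  intro n
  induction n with
  | zero =>
    intro g c1 c2 hg
    have : g = [] := List.eq_nil_of_length_eq_zero (Nat.le_zero.mp hg)
    subst this
    rw [solutionGoB.eq_def]
    simp [greedyGo, stripRun]
  | succ n ih =>
    intro g c1 c2 hg
    cases g with
    | nil =>
      rw [solutionGoB.eq_def]; simp [greedyGo, stripRun]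
    | cons w gr =>
      by_cases hc1 : c1.head? = some w
      · obtain ⟨x, c1r, rfl⟩ : ∃ x c1r, c1 = x :: c1r := by
          cases c1 with
          | nil => simp at hc1
          | cons a b => exact ⟨a, b, rfl⟩
        have hwx : w = x := by simpa [eq_comm] using hc1
        have hs : stripRun (w :: gr) (x :: c1r) = stripRun gr c1r := by
          simp [stripRun, hwx]
        rw [solutionGoB_congr _ _ _ _ c2 hs]
        simp only [greedyGo, if_pos hc1, List.tail_cons]
        exact ih gr c1r c2 (by simp at hg; omega)
      · have hs : stripRun (w :: gr) c1 = (w :: gr, c1) := by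
          cases c1 with
          | nil => simp [stripRun]
          | cons x c1r =>
            have : ¬ w = x := by
              intro h; apply hc1; simp [h]
            simp [stripRun, this]
        rw [solutionGoB.eq_def, hs]
        simp only [greedyGo, if_neg hc1]
        cases c2 with
        | nil => simp
        | cons y c2r =>
          show _ = if y = w then solutionGoB gr c1 c2r else "No"
          by_cases hy : y = w
          · rw [if_pos (by simp [hy]), if_pos hy]
            simp only [List.tail_cons]
            exact ih gr c1 c2r (by simp at hg; omega)
          · rw [if_neg (by simp [hy]), if_neg hy]

-- ===== VERDICT (by name: the statement is the Claim_ definition above) =====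
theorem solution_spec : Claim_equal_solution := by
  intro cards1 cards2 goal _
  unfold Spec_solution solution solution_alt
  have hmain := solution_main cards1 cards2 goal 0 0 0
  simp only [List.drop_zero, Nat.zero_add] at hmain
  rw [← greedy_eq_goB goal.length goal cards1 cards2 (le_refl _)]
  rcases greedyGo_yes_or_no goal cards1 cards2 with hy | hn
  · rw [if_pos (hmain.mpr hy), hy]
  · rw [if_neg (fun h => absurd (hmain.mp h) (by simp [hn])), hn]
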